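-- pv_equiv track=rewrite | github.com/FranRovi/Algorithms | HackerRank/Easy/gameOfThronesI.py | gameOfThronesI
-- ===== SOURCE A (Python) =====
-- def gameOfThronesI(s):
--     oddCounter = 0
--     hashString = {}
--     for i in range(len(s)):
--         if s[i] not in hashString:
--             hashString[s[i]] = 1
--         else:
--             hashString[s[i]] += 1
--     listChar =  list(hashString.values())
--     for j in range(len(listChar)):
--         if listChar[j] % 2 != 0:
--             oddCounter += 1
--     if oddCounter > 1:
--         return "NO"
--     return "YES"
-- ===== SOURCE B (Python) =====
-- def gameOfThronesI(s):
--     odd = set()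
--     for c in s:
--         if c in odd:
--             odd.discard(c)
--         else:
--             odd.add(c)
--     return "NO" if len(odd) > 1 else "YES"
-- ===== Notes on version B (the rewrite author's own statement) =====
-- stated objective: idiomatic
-- what changed: Replaces the count-dictionary build plus a separate odd-value-counting loop with a single parity-toggling pass over a set of characters seen an odd number of times.
import Mathlib
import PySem

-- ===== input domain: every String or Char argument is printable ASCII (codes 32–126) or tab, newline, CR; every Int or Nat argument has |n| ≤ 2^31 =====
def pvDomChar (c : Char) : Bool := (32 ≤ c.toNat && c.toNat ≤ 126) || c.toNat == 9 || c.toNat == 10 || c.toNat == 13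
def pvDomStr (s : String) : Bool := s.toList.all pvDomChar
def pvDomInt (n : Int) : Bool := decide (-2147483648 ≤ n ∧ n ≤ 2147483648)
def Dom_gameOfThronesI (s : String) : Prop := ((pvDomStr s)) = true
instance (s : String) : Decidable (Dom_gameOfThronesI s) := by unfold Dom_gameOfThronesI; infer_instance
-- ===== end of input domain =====

-- B replaces A's count-dictionary plus a second odd-counting loop with one parity-toggling pass
-- over a set of characters seen an odd number of times (idiomatic; same return value everywhere).

-- ===== PORT A =====
def gameOfThronesI (s : String) : String :=
  let hashString := s.toList.foldl
    (fun d c =>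
      if d.contains c = false then d.insert c 1
      else d.insert c (d.getD c 0 + 1))
    PySem.Dict.empty
  let listChar := hashString.values
  let oddCounter := listChar.foldl
    (fun acc v => if PySem.Int.mod v 2 ≠ 0 then acc + 1 else acc) (0 : Int)
  if oddCounter > 1 then "NO" else "YES"

-- ===== PORT B =====
def gameOfThronesI_alt (s : String) : String :=
  let odd := s.toList.foldl
    (fun t c => if PySem.Set.contains t c then PySem.Set.discard t c else PySem.Set.add t c)
    PySem.Set.empty
  if PySem.Set.len odd > 1 then "NO" else "YES"

-- ===== PRECONDITION & SPEC =====
def Spec_gameOfThronesI (s : String) (out : String) : Prop := out = gameOfThronesI_alt s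
instance (s : String) (out : String) : Decidable (Spec_gameOfThronesI s out) := by unfold Spec_gameOfThronesI; infer_instance

-- ===== CLAIM (what is proved, stated in full; the proofs are below) =====
def Claim_equal_gameOfThronesI : Prop := ∀ (s : String), Dom_gameOfThronesI s → Spec_gameOfThronesI s (gameOfThronesI s)

-- ===== LEMMAS AND PROOFS =====

-- A's dict-building step is exactly the Counter step.
theorem stepA_eq_counter (d : PySem.Dict Char Int) (c : Char) :
    (if d.contains c = false then d.insert c 1
     else d.insert c (d.getD c 0 + 1)) = d.modify c 0 (· + 1) := by
  by_cases h : d.contains c = false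
  · have hg : d.getD c 0 = 0 := by
      simp [PySem.Dict.getD, (PySem.Dict.get?_eq_none_iff_contains d c).mpr h]
    rw [if_pos h]
    show d.insert c 1 = d.insert c (d.getD c 0 + 1)
    rw [hg]; norm_num
  · rw [if_neg h]; rfl

-- A's first loop builds Counter(s).
theorem dictA_eq_counter (l : List Char) :
    l.foldl (fun d c =>
      if d.contains c = false then d.insert c 1
      else d.insert c (d.getD c 0 + 1)) PySem.Dict.empty
    = PySem.Dict.counter l := by
  have hf : (fun (d : PySem.Dict Char Int) (c : Char) =>
      if d.contains c = false then d.insert c 1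
      else d.insert c (d.getD c 0 + 1))
      = (fun d c => d.modify c 0 (· + 1)) := by
    funext d c; exact stepA_eq_counter d c
  rw [hf, PySem.Dict.counter_eq_foldl]

-- A's second loop is a countP.
theorem oddFold_eq_countP (vs : List Int) (a : Int) :
    vs.foldl (fun acc v => if PySem.Int.mod v 2 ≠ 0 then acc + 1 else acc) a
    = a + (vs.countP (fun v => decide (PySem.Int.mod v 2 ≠ 0)) : Int) := by
  induction vs generalizing a with
  | nil => simp
  | cons v vs ih =>
    rw [List.foldl_cons, ih, List.countP_cons]
    by_cases h : PySem.Int.mod v 2 ≠ 0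
    · rw [if_pos h, decide_eq_true h]; simp; ring
    · rw [if_neg h, decide_eq_false h]; simp

-- membership in one toggle step
theorem mem_toggle_step (t : PySem.Set Char) (c x : Char) :
    x ∈ (if PySem.Set.contains t c then PySem.Set.discard t c else PySem.Set.add t c)
    ↔ ((x ∈ t ∧ x ≠ c) ∨ (x ∉ t ∧ x = c)) := by
  by_cases h : PySem.Set.contains t c
  · have hc : c ∈ t := (PySem.Set.contains_iff t c).mp h
    rw [if_pos h, PySem.Set.mem_discard]
    constructor
    · rintro ⟨hx, hne⟩; exact Or.inl ⟨hx, hne⟩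
    · rintro (⟨hx, hne⟩ | ⟨hx, rfl⟩)
      · exact ⟨hx, hne⟩
      · exact absurd hc hx
  · have hc : c ∉ t := fun hm => h ((PySem.Set.contains_iff t c).mpr hm)
    rw [if_neg h, PySem.Set.mem_add]
    constructor
    · rintro (hx | rfl)
      · exact Or.inl ⟨hx, fun he => hc (he ▸ hx)⟩
      · exact Or.inr ⟨hc, rfl⟩
    · rintro (⟨hx, _⟩ | ⟨_, rfl⟩)
      · exact Or.inl hx
      · exact Or.inr rfl

theorem nodup_toggle (l : List Char) (t : PySem.Set Char) (h : t.Nodup) :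
    (l.foldl (fun t c => if PySem.Set.contains t c then PySem.Set.discard t c else PySem.Set.add t c) t).Nodup := by
  induction l generalizing t with
  | nil => exact h
  | cons c l ih =>
    rw [List.foldl_cons]
    apply ih
    dsimp only
    by_cases hc : PySem.Set.contains t c
    · rw [if_pos hc]; exact PySem.Set.nodup_discard t c h
    · rw [if_neg hc]; exact PySem.Set.nodup_add t c h

theorem mem_toggle (l : List Char) (t : PySem.Set Char) (x : Char) :
    x ∈ l.foldl (fun t c => if PySem.Set.contains t c then PySem.Set.discard t c else PySem.Set.add t c) t
    ↔ ((x ∈ t ∧ l.count x % 2 = 0) ∨ (x ∉ t ∧ l.count x % 2 = 1)) := by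
  induction l generalizing t with
  | nil => simp
  | cons c l ih =>
    rw [List.foldl_cons]
    rw [ih, mem_toggle_step]
    by_cases hxc : x = c
    · subst hxc
      rw [List.count_cons_self]
      by_cases hx : x ∈ t <;> simp [hx] <;> omega
    · have hcx : ¬c = x := fun h => hxc h.symm
      have hcnt : List.count x (c :: l) = List.count x l := by
        simp [hcx]
      rw [hcnt]
      simp only [hxc, and_false, or_false, and_true, not_false_eq_true, ne_eq]

-- both "NO" thresholds count the same characters
theorem toggle_length (l : List Char) :
    (l.foldl (fun t c => if PySem.Set.contains t c then PySem.Set.discard t c else PySem.Set.add t c)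
      PySem.Set.empty).length
    = ((PySem.Set.ofList l).filter (fun k => decide (l.count k % 2 = 1))).length := by
  apply List.Perm.length_eq
  rw [List.perm_ext_iff_of_nodup (nodup_toggle l _ (by simp [PySem.Set.empty]))
      ((PySem.Set.nodup_ofList l).filter _)]
  intro x
  rw [mem_toggle]
  simp only [List.mem_filter, PySem.Set.mem_ofList, decide_eq_true_eq, PySem.Set.empty,
    List.not_mem_nil, false_and, not_false_eq_true, true_and, false_or]
  constructor
  · intro hp
    exact ⟨List.count_pos_iff.mp (by omega), hp⟩
  · exact fun h => h.2

theorem mod_cast_count (n : Nat) : (PySem.Int.mod (n : Int) 2 ≠ 0) ↔ n % 2 = 1 := by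
  have h : PySem.Int.mod (n : Int) 2 = (n : Int) % 2 := by
    show Int.fmod (n : Int) 2 = (n : Int) % 2
    rw [Int.fmod_eq_emod]; norm_num
  rw [h]
  omega

theorem countA_eq (l : List Char) :
    List.countP (fun v => decide (PySem.Int.mod v 2 ≠ 0)) (PySem.Dict.counter l).values
    = ((PySem.Set.ofList l).filter (fun k => decide (l.count k % 2 = 1))).length := by
  have hv : (PySem.Dict.counter l).values
      = (PySem.Set.ofList l).map (fun k => ((l.count k : Nat) : Int)) := by
    simp [PySem.Dict.values, PySem.Dict.items_counter, List.map_map, Function.comp]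
  rw [hv, List.countP_map, ← List.countP_eq_length_filter]
  apply List.countP_congr
  intro k _
  simp only [Function.comp, decide_eq_true_eq]
  rw [mod_cast_count]

-- ===== VERDICT (by name: the statement is the Claim_ definition above) =====
theorem gameOfThronesI_spec : Claim_equal_gameOfThronesI := by
  intro s _
  unfold Spec_gameOfThronesI gameOfThronesI gameOfThronesI_alt
  simp only [dictA_eq_counter, oddFold_eq_countP, countA_eq, PySem.Set.len, toggle_length,
    zero_add]
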